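-- pv_equiv track=rewrite | github.com/PierreVieira/URI | Python/Strings/2292 - Painel LED.py | solve_this_problem
-- ===== SOURCE A (Python) =====
-- def decidir(elemento):
--     if elemento[0] == 'X' and elemento[1] % 2 == 0:
--         return 'X'
--     elif elemento[0] == 'X' and elemento[1] % 2 == 1:
--         return 'O'
--     elif elemento[0] == 'O' and elemento[1] % 2 == 0:
--         return 'O'
--     return 'X'
--
-- def solve_this_problem(string, qtde_piscadas):
--     lista_qtde_vezes_trocou_de_estado = [qtde_piscadas]
--     lista_qtde_vezes_apagou = [qtde_piscadas // 2 if string[0] == 'X' else (qtde_piscadas + 1) // 2]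
--     for c in range(1, len(string)):
--         lista_qtde_vezes_trocou_de_estado.append(lista_qtde_vezes_apagou[c - 1])
--         lista_qtde_vezes_apagou.append(lista_qtde_vezes_trocou_de_estado[-1] // 2 if string[c] == 'X' else (lista_qtde_vezes_trocou_de_estado[-1] + 1) // 2)
--     correspondencia = tuple(zip(list(string), lista_qtde_vezes_trocou_de_estado))
--     return ''.join(list(map(decidir, correspondencia)))
-- ===== SOURCE B (Python) =====
-- def solve_this_problem(string, qtde_piscadas):
--     # Closed form via binary arithmetic: the toggle counter before char i is
--     # (q + B_i) // 2**i, where B_i is the binary number whose k-th bit (k < i)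
--     # is 1 for a non-'X' char.  Bits at positions >= i cannot change bit i of
--     # that quotient except bit i itself, so with the FULL number B the parity
--     # at position i is bit i of S = q + B, XOR bit i of B -- no sequential
--     # halving: one int() builds B, one format() exposes every bit of S at once.
--     n = len(string)
--     rev = ''.join('0' if c == 'X' else '1' for c in reversed(string))
--     bnum = int('0' + rev, 2)
--     low = format((qtde_piscadas + bnum) % (1 << n), 'b').zfill(n)
--     out = []
--     for i, c in enumerate(string):
--         odd = (low[n - 1 - i] == '1') != (rev[n - 1 - i] == '1')
--         if c == 'X':
--             out.append('O' if odd else 'X')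
--         elif c == 'O':
--             out.append('X' if odd else 'O')
--         else:
--             out.append('X')
--     return ''.join(out)
-- ===== Notes on version B (the rewrite author's own statement) =====
-- stated objective: alternative
-- what changed: Replaces the sequential halving recurrence (two parallel count lists zipped and mapped through a branch table) by closed-form bit arithmetic: build the binary number B of the non-'X' bits with one int() call, take the low bits of S = q + B, and read every output parity independently as bit i of S XOR bit i of B from one format(...,'b') string; correct because higher bits cannot affect lower bits of a floor quotient.
import Mathlib
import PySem

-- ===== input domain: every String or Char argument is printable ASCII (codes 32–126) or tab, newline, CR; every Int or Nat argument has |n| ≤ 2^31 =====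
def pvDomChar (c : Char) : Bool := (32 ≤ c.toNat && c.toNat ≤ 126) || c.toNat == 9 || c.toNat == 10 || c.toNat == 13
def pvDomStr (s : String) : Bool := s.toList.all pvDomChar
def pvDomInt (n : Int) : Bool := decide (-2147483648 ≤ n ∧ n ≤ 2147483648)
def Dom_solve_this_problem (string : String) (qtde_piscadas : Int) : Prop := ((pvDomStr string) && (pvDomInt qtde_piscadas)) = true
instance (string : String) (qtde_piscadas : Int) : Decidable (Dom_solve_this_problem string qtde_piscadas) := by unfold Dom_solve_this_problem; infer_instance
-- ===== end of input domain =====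

-- B replaces A's sequential halving recurrence (two parallel count lists + zip + mapped
-- branch table) by closed-form bit arithmetic: one sum S = q + binary number of the
-- non-'X' bits, then each output char read independently from a parity of S (alternative).

-- ===== PORT A =====
def decidir (elemento : Char × Int) : Char :=
  if elemento.1 = 'X' ∧ PySem.Int.mod elemento.2 2 = 0 then 'X'
  else if elemento.1 = 'X' ∧ PySem.Int.mod elemento.2 2 = 1 then 'O'
  else if elemento.1 = 'O' ∧ PySem.Int.mod elemento.2 2 = 0 then 'O'
  else 'X'

-- the loop body of A's for-loop (state: the two lists, argument: the index c)
def pvBodyA (cs : List Char) (st : List Int × List Int) (c : Int) : List Int × List Int :=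
  let trocou := st.1 ++ [PySem.List.pyGetD st.2 (c - 1) 0]
  let apagou := st.2 ++
    [if PySem.List.pyGetD cs c ' ' = 'X'
     then PySem.Int.floordiv (PySem.List.pyGetD trocou (-1) 0) 2
     else PySem.Int.floordiv (PySem.List.pyGetD trocou (-1) 0 + 1) 2]
  (trocou, apagou)

def solve_this_problem (string : String) (qtde_piscadas : Int) : String :=
  let cs := string.toList
  let init : List Int × List Int :=
    ([qtde_piscadas],
     [if PySem.List.pyGetD cs 0 ' ' = 'X' then PySem.Int.floordiv qtde_piscadas 2
      else PySem.Int.floordiv (qtde_piscadas + 1) 2])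
  let st := (PySem.List.pyRange 1 (cs.length : Int) 1).foldl (pvBodyA cs) init
  String.mk ((cs.zip st.1).map decidir)

-- ===== PORT B =====
-- int(x, 2): exact on '0'/'1' digit strings (the only strings Source B feeds it)
def pvParseBin (s : List Char) : Int :=
  s.foldl (fun a c => 2 * a + (if c = '1' then 1 else 0)) 0

-- binary digits of a nonnegative int, least significant first
def pvBinRev (t : Nat) : List Char :=
  if h : t = 0 then [] else (if t % 2 = 1 then '1' else '0') :: pvBinRev (t / 2)
decreasing_by exact Nat.div_lt_self (Nat.pos_of_ne_zero h) (by omega)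

-- format(t, 'b') on a nonnegative int: most-significant-first digits, '0' for 0 (exact)
def pvFmtB (t : Nat) : List Char := if t = 0 then ['0'] else (pvBinRev t).reverse

-- str.zfill(n) on a digit string (exact: no sign character here)
def pvZfill (n : Nat) (s : List Char) : List Char := List.replicate (n - s.length) '0' ++ s

-- the loop body: low[n-1-i], rev[n-1-i] are in range for 0 <= i < n, so getD is exact
def pvOutChar (low rev : List Char) (n : Nat) (c : Char) (i : Nat) : Char :=
  let odd := ((low.getD (n - 1 - i) ' ') == '1') != ((rev.getD (n - 1 - i) ' ') == '1')
  if c = 'X' then (if odd then 'O' else 'X')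
  else if c = 'O' then (if odd then 'X' else 'O')
  else 'X'

-- 1 << n is 2 ^ n; '%' with the positive divisor 2 ^ n is nonneg, so '.toNat' is exact,
-- and the enumerate index is nonneg, so its '.toNat' is exact too.
def solve_this_problem_alt (string : String) (qtde_piscadas : Int) : String :=
  let cs := string.toList
  let n := cs.length
  let rev := cs.reverse.map (fun c => if c = 'X' then '0' else '1')
  let bnum := pvParseBin ('0' :: rev)
  let low := pvZfill n (pvFmtB ((PySem.Int.mod (qtde_piscadas + bnum) ((2 : Int) ^ n)).toNat))
  String.mk ((PySem.List.enumerate cs).map (fun ic => pvOutChar low rev n ic.2 ic.1.toNat))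

-- ===== PRECONDITION & SPEC =====
-- Pre_ excludes only the empty string, on which A raises IndexError (it reads string[0]).
def Pre_solve_this_problem (string : String) (_qtde_piscadas : Int) : Prop := string ≠ ""
instance (string : String) (qtde_piscadas : Int) : Decidable (Pre_solve_this_problem string qtde_piscadas) := by unfold Pre_solve_this_problem; infer_instance
def pvWitness_solve_this_problem : String × Int := ("XO", 3)

def Spec_solve_this_problem (string : String) (qtde_piscadas : Int) (out : String) : Prop := out = solve_this_problem_alt string qtde_piscadas
instance (string : String) (qtde_piscadas : Int) (out : String) : Decidable (Spec_solve_this_problem string qtde_piscadas out) := by unfold Spec_solve_this_problem; infer_instance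

-- ===== CLAIM (what is proved, stated in full; the proofs are below) =====
def Claim_equal_solve_this_problem : Prop := ∀ (string : String) (qtde_piscadas : Int), Dom_solve_this_problem string qtde_piscadas → Pre_solve_this_problem string qtde_piscadas → Spec_solve_this_problem string qtde_piscadas (solve_this_problem string qtde_piscadas)

-- ===== LEMMAS AND PROOFS =====

-- proof-side reference semantics: the streaming view both ports are reduced to
def pvEmit (c : Char) (v : Int) : Char :=
  if c = 'X' then (if PySem.Int.mod v 2 = 0 then 'X' else 'O')
  else if c = 'O' then (if PySem.Int.mod v 2 = 0 then 'O' else 'X')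
  else 'X'

def pvStep (c : Char) (v : Int) : Int :=
  if c = 'X' then PySem.Int.floordiv v 2 else PySem.Int.floordiv (v + 1) 2

def pvGo : List Char → Int → List Char
  | [], _ => []
  | c :: rest, v => pvEmit c v :: pvGo rest (pvStep c v)

-- the sequence of "times the state toggled" counters: v_0 = q, v_{i+1} = step cs[i] v_i
def pvVseq (cs : List Char) (q : Int) : Nat → Int
  | 0 => q
  | n + 1 => pvStep (cs.getD n ' ') (pvVseq cs q n)

def pvBits (cs : List Char) : List Int := cs.map (fun c => if c = 'X' then 0 else 1)

def pvBnum : List Int → Int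
  | [] => 0
  | b :: bs => b + 2 * pvBnum bs

theorem pvGetD_map_range (f : Nat → Int) (n j : Nat) (h : j < n) :
    (((List.range n).map f).getD j 0) = f j := by
  simp [List.getD, h]

-- ===== A-side: the fold invariant, then A = pvGo =====
theorem pvFold_inv (cs : List Char) (q : Int) (j : Nat) (hj : j + 1 ≤ cs.length) :
    (((List.range j).map (fun k : Nat => (1 : Int) + (k : Int))).foldl (pvBodyA cs)
      ([q], [if PySem.List.pyGetD cs 0 ' ' = 'X' then PySem.Int.floordiv q 2
             else PySem.Int.floordiv (q + 1) 2]) :)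
    = ((List.range (j + 1)).map (pvVseq cs q),
       (List.range (j + 1)).map (fun i => pvVseq cs q (i + 1))) := by
  induction j with
  | zero =>
      have h0 : cs ≠ [] := by intro h; simp [h] at hj
      simp [List.range_succ, pvVseq, pvStep, PySem.List.pyGetD_zero, List.getD]
  | succ j ih =>
      have hj' : j + 1 ≤ cs.length := by omega
      rw [List.range_succ, List.map_append, List.foldl_append, ih hj']
      simp only [List.map_cons, List.map_nil, List.foldl_cons, List.foldl_nil, pvBodyA]
      have e1 : ((1 : Int) + j) - 1 = ((j : Nat) : Int) := by ring
      have e2 : ((1 : Int) + j) = (((j + 1 : Nat)) : Int) := by push_cast; ring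
      rw [e1, e2]
      simp only [PySem.List.pyGetD_natCast]
      rw [pvGetD_map_range (fun i => pvVseq cs q (i + 1)) (j + 1) j (by omega)]
      rw [PySem.List.pyGetD_neg_one_append_singleton]
      have hstep : (if cs.getD (↑(j + 1)) ' ' = 'X'
          then PySem.Int.floordiv (pvVseq cs q (j + 1)) 2
          else PySem.Int.floordiv (pvVseq cs q (j + 1) + 1) 2) = pvVseq cs q (j + 2) := by
        simp [pvVseq, pvStep]
      rw [hstep]
      simp [List.range_succ]

theorem pvVseq_shift (c : Char) (rest : List Char) (q : Int) (i : Nat) :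
    pvVseq (c :: rest) q (i + 1) = pvVseq rest (pvStep c q) i := by
  induction i with
  | zero => simp [pvVseq]
  | succ i ih =>
      have h : pvVseq (c :: rest) q (i + 1 + 1)
          = pvStep ((c :: rest).getD (i + 1) ' ') (pvVseq (c :: rest) q (i + 1)) := rfl
      rw [h, ih, List.getD_cons_succ]
      rfl

theorem pvDecidir_emit (c : Char) (v : Int) : decidir (c, v) = pvEmit c v := by
  rcases PySem.Int.mod_two_eq v with h | h <;>
    by_cases hX : c = 'X' <;> by_cases hO : c = 'O' <;>
      · simp only [decidir, pvEmit, h]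
        simp [hX, hO]

theorem pvZip_map_eq_go (cs : List Char) (q : Int) :
    (cs.zip ((List.range cs.length).map (pvVseq cs q))).map decidir = pvGo cs q := by
  induction cs generalizing q with
  | nil => simp [pvGo]
  | cons c rest ih =>
      have hf : (fun i => pvVseq (c :: rest) q (i + 1)) = pvVseq rest (pvStep c q) :=
        funext (fun i => pvVseq_shift c rest q i)
      calc ((c :: rest).zip ((List.range (c :: rest).length).map (pvVseq (c :: rest) q))).map decidir
          = decidir (c, q) ::
            (rest.zip ((List.range rest.length).map (fun i => pvVseq (c :: rest) q (i + 1)))).map decidir := by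
            simp [List.range_succ_eq_map, List.map_map, pvVseq, Function.comp_def]
        _ = pvEmit c q :: pvGo rest (pvStep c q) := by
            rw [hf, ih, pvDecidir_emit]
        _ = pvGo (c :: rest) q := rfl

theorem pvA_eq_go (string : String) (q : Int) (hpre : string ≠ "") :
    solve_this_problem string q = String.mk (pvGo string.toList q) := by
  have hne : string.toList ≠ [] := fun h => hpre (String.toList_eq_nil_iff.mp h)
  have hlen : 1 ≤ string.toList.length := List.length_pos_iff.mpr hne
  show String.mk ((string.toList.zip
      (((PySem.List.pyRange 1 (string.toList.length : Int) 1).foldl (pvBodyA string.toList)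
        ([q], [if PySem.List.pyGetD string.toList 0 ' ' = 'X' then PySem.Int.floordiv q 2
               else PySem.Int.floordiv (q + 1) 2])).1)).map decidir)
    = String.mk (pvGo string.toList q)
  rw [PySem.List.pyRange_one]
  have hcast : ((string.toList.length : Int) - 1).toNat = string.toList.length - 1 := by omega
  rw [hcast, pvFold_inv string.toList q (string.toList.length - 1) (by omega)]
  have : string.toList.length - 1 + 1 = string.toList.length := by omega
  rw [this, pvZip_map_eq_go]

-- ===== B-side: parse, bit extraction, the bit identity, then B = pvGo =====
theorem pvParse_aux (cs : List Char) (a : Int) :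
    (cs.reverse.map (fun c => if c = 'X' then '0' else '1')).foldl
      (fun a c => 2 * a + (if c = '1' then 1 else 0)) a
    = a * 2 ^ cs.length + pvBnum (pvBits cs) := by
  induction cs with
  | nil => simp [pvBits, pvBnum]
  | cons c rest ih =>
      simp only [List.reverse_cons, List.map_append, List.map_cons, List.map_nil,
        List.foldl_append, List.foldl_cons, List.foldl_nil, ih]
      by_cases h : c = 'X' <;> simp [h, pvBits, pvBnum, pow_succ] <;> ring

theorem pvParse_eq (cs : List Char) :
    pvParseBin ('0' :: cs.reverse.map (fun c => if c = 'X' then '0' else '1'))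
    = pvBnum (pvBits cs) := by
  unfold pvParseBin
  simp only [List.foldl_cons]
  have := pvParse_aux cs (2 * 0 + (if '0' = '1' then 1 else 0))
  simpa using this

theorem pvBinRev_getD (i : Nat) : ∀ t : Nat, (pvBinRev t).getD i '0'
    = if t / 2 ^ i % 2 = 1 then '1' else '0' := by
  induction i with
  | zero =>
      intro t
      by_cases h : t = 0
      · simp [pvBinRev, h]
      · rw [pvBinRev]; simp [h]
  | succ i ih =>
      intro t
      by_cases h : t = 0
      · simp [pvBinRev, h]
      · rw [pvBinRev]
        simp only [h, dite_false, if_neg h, List.getD_cons_succ, ih (t / 2)]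
        have : t / 2 / 2 ^ i = t / 2 ^ (i + 1) := by
          rw [Nat.div_div_eq_div_mul, pow_succ']
        rw [this]

theorem pvBinRev_len (n : Nat) : ∀ t : Nat, t < 2 ^ n → (pvBinRev t).length ≤ n := by
  induction n with
  | zero =>
      intro t ht
      have : t = 0 := by simpa using ht
      simp [pvBinRev, this]
  | succ n ih =>
      intro t ht
      by_cases h : t = 0
      · simp [pvBinRev, h]
      · rw [pvBinRev]
        simp only [h, dite_false, List.length_cons]
        have : t / 2 < 2 ^ n := by
          rw [pow_succ] at ht; omega
        have := ih (t / 2) this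
        omega

theorem pvGetD_rev (xs : List Char) (i : Nat) (h : i < xs.length) (d : Char) :
    xs.getD (xs.length - 1 - i) d = xs.reverse.getD i d := by
  have h2 : xs.length - 1 - i < xs.length := by omega
  have h3 : i < xs.reverse.length := by simpa using h
  rw [List.getD_eq_getElem _ _ h2, List.getD_eq_getElem _ _ h3, List.getElem_reverse]

theorem pvGetD_append_replicate (xs : List Char) (m i : Nat) (h : i < xs.length + m) :
    (xs ++ List.replicate m '0').getD i ' ' = xs.getD i '0' := by
  by_cases hl : i < xs.length
  · rw [List.getD_eq_getElem _ _ (by simp; omega), List.getElem_append_left hl,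
      List.getD_eq_getElem _ _ hl]
  · rw [List.getD_eq_getElem _ _ (by simp; omega), List.getElem_append_right (by omega)]
    simp [List.getD, List.getElem?_eq_none (by omega : xs.length ≤ i)]

theorem pvLow_getD (T n i : Nat) (hi : i < n) (hT : T < 2 ^ n) :
    (pvZfill n (pvFmtB T)).getD (n - 1 - i) ' ' = (pvBinRev T).getD i '0' := by
  have hlen : (pvFmtB T).length ≤ n := by
    by_cases h : T = 0
    · simp [pvFmtB, h]; omega
    · simp only [pvFmtB, if_neg h, List.length_reverse]
      exact pvBinRev_len n T hT
  have hP : (pvZfill n (pvFmtB T)).length = n := by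
    simp [pvZfill]; omega
  have hrev : (pvZfill n (pvFmtB T)).reverse
      = pvBinRev T ++ List.replicate (n - (pvBinRev T).length) '0' := by
    by_cases h : T = 0
    · subst h
      have h0 : pvFmtB 0 = ['0'] := by simp [pvFmtB]
      have hb0 : pvBinRev 0 = [] := by simp [pvBinRev]
      rw [pvZfill, h0, hb0, List.reverse_append]
      simp only [List.reverse_replicate, List.reverse_cons, List.reverse_nil, List.nil_append,
        List.length_cons, List.length_nil, List.length_replicate]
      rw [List.singleton_append, ← List.replicate_succ]
      congr 1
      omega
    · simp only [pvZfill, pvFmtB, if_neg h, List.reverse_append, List.reverse_replicate,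
        List.reverse_reverse, List.length_reverse]
  calc (pvZfill n (pvFmtB T)).getD (n - 1 - i) ' '
      = (pvZfill n (pvFmtB T)).getD ((pvZfill n (pvFmtB T)).length - 1 - i) ' ' := by rw [hP]
    _ = (pvZfill n (pvFmtB T)).reverse.getD i ' ' := pvGetD_rev _ i (by omega) ' '
    _ = (pvBinRev T ++ List.replicate (n - (pvBinRev T).length) '0').getD i ' ' := by rw [hrev]
    _ = (pvBinRev T).getD i '0' := by
        apply pvGetD_append_replicate
        have hb : (pvBinRev T).length ≤ n := by
          by_cases h : T = 0
          · simp [pvBinRev, h]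
          · have := hlen; simp only [pvFmtB, if_neg h, List.length_reverse] at this; exact this
        omega

theorem pvRev_getD (cs : List Char) (i : Nat) (h : i < cs.length) :
    (cs.reverse.map (fun c => if c = 'X' then '0' else '1')).getD (cs.length - 1 - i) ' '
    = (if cs[i] = 'X' then '0' else '1') := by
  have hl : (cs.reverse.map (fun c => if c = 'X' then '0' else '1')).length = cs.length := by simp
  rw [← hl]
  rw [pvGetD_rev _ i (by simp [hl, h]) ' ']
  have : (cs.reverse.map (fun c => if c = 'X' then '0' else '1')).reverse
      = cs.map (fun c => if c = 'X' then '0' else '1') := by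
    rw [← List.map_reverse, List.reverse_reverse]
  rw [this, List.getD_eq_getElem _ _ (by simpa using h), List.getElem_map]

theorem pvStep_eq (c : Char) (q : Int) :
    pvStep c q = (q + (if c = 'X' then (0 : Int) else 1)) / 2 := by
  by_cases h : c = 'X' <;>
    simp [pvStep, h, PySem.Int.floordiv_eq_ediv_of_pos]

-- the key bit identity: the full binary sum determines each counter up to its own bit
theorem pvDiv_parity (i : Nat) (cs : List Char) (q : Int) (h : i < cs.length) :
    ∃ t : Int, (q + pvBnum (pvBits cs)) / 2 ^ i
      = pvVseq cs q i + (pvBits cs).getD i 0 + 2 * t := by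
  induction i generalizing cs q with
  | zero =>
      cases cs with
      | nil => simp at h
      | cons c rest =>
          refine ⟨pvBnum (pvBits rest), ?_⟩
          simp [pvBits, pvBnum, pvVseq, List.getD]
          ring
  | succ i ih =>
      cases cs with
      | nil => simp at h
      | cons c rest =>
          have hrest : i < rest.length := by simpa using h
          obtain ⟨t, ht⟩ := ih rest (pvStep c q) hrest
          refine ⟨t, ?_⟩
          have hsplit : (q + pvBnum (pvBits (c :: rest))) / 2 ^ (i + 1)
              = (pvStep c q + pvBnum (pvBits rest)) / 2 ^ i := by
            have h1 : (q + pvBnum (pvBits (c :: rest)))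
                = (q + (if c = 'X' then (0 : Int) else 1)) + pvBnum (pvBits rest) * 2 := by
              simp [pvBits, pvBnum]; ring
            have h2 : (2 : Int) ^ (i + 1) = 2 * 2 ^ i := by ring
            rw [h1, h2, ← Int.ediv_ediv_of_nonneg (by norm_num : (0:Int) ≤ 2),
              Int.add_mul_ediv_right _ _ (by norm_num : (2:Int) ≠ 0), pvStep_eq]
          rw [hsplit, ht, pvVseq_shift]
          have : (pvBits (c :: rest)).getD (i + 1) 0 = (pvBits rest).getD i 0 := by
            simp [pvBits]
          rw [this]

-- bit i of S is unchanged by taking the low n bits (i < n)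
theorem pvModPow_bit (S : Int) (n i : Nat) (hi : i < n) :
    (S % (2 : Int) ^ n) / 2 ^ i % 2 = S / 2 ^ i % 2 := by
  set k : Int := S / 2 ^ n with hk
  have hsplit : S % (2 : Int) ^ n = S + (-k) * 2 ^ n := by
    rw [Int.emod_def, hk]; ring
  have hpow : S + (-k) * (2 : Int) ^ n = S + (-k * 2 ^ (n - i)) * 2 ^ i := by
    rw [mul_assoc, ← pow_add]
    congr 3
    omega
  rw [hsplit, hpow, Int.add_mul_ediv_right _ _ (by positivity : ((2:Int) ^ i) ≠ 0)]
  have hni : (2 : Int) ^ (n - i) = 2 * 2 ^ (n - i - 1) := by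
    rw [← pow_succ']; congr 1; omega
  rw [show S / 2 ^ i + -k * (2 : Int) ^ (n - i)
      = S / 2 ^ i + 2 * (-k * 2 ^ (n - i - 1)) from by rw [hni]; ring,
    Int.add_mul_emod_self_left]

theorem pvGo_length (cs : List Char) (q : Int) : (pvGo cs q).length = cs.length := by
  induction cs generalizing q with
  | nil => rfl
  | cons c rest ih => simp [pvGo, ih]

theorem pvGo_getD (cs : List Char) (q : Int) (i : Nat) (h : i < cs.length) :
    (pvGo cs q).getD i ' ' = pvEmit (cs.getD i ' ') (pvVseq cs q i) := by
  induction cs generalizing q i with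
  | nil => simp at h
  | cons c rest ih =>
      cases i with
      | zero => simp [pvGo, pvVseq]
      | succ i =>
          have hrest : i < rest.length := by simpa using h
          simp only [pvGo, List.getD_cons_succ]
          rw [ih (pvStep c q) i hrest, pvVseq_shift]

-- per-element correctness of B's loop body against the streaming semantics
theorem pvElem (cs : List Char) (q : Int) (i : Nat) (h : i < cs.length) :
    pvOutChar
      (pvZfill cs.length (pvFmtB ((PySem.Int.mod
        (q + pvParseBin ('0' :: cs.reverse.map (fun c => if c = 'X' then '0' else '1')))
        ((2 : Int) ^ cs.length)).toNat)))
      (cs.reverse.map (fun c => if c = 'X' then '0' else '1')) cs.length cs[i] i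
    = pvEmit cs[i] (pvVseq cs q i) := by
  set n := cs.length with hn
  set S : Int := q + pvBnum (pvBits cs) with hS
  have hpos : (0 : Int) < 2 ^ n := by positivity
  set T : Nat := (PySem.Int.mod
      (q + pvParseBin ('0' :: cs.reverse.map (fun c => if c = 'X' then '0' else '1')))
      ((2 : Int) ^ n)).toNat with hT
  have hTe : (T : Int) = S % 2 ^ n := by
    rw [hT, pvParse_eq, PySem.Int.mod_eq_emod_of_pos hpos,
      Int.toNat_of_nonneg (Int.emod_nonneg _ (by positivity)), hS]
  have hTlt : T < 2 ^ n := by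
    have h1 : (T : Int) < 2 ^ n := by
      rw [hTe]; exact Int.emod_lt_of_pos _ hpos
    exact_mod_cast h1
  -- the extracted digit equals the parity of the toggle counter plus its own bit
  obtain ⟨t, ht⟩ := pvDiv_parity i cs q h
  set d : Nat := T / 2 ^ i % 2 with hd
  have hbit : ((d : Nat) : Int) = (pvVseq cs q i + (pvBits cs).getD i 0) % 2 := by
    rw [hd]
    push_cast
    rw [hTe, pvModPow_bit S n i h, hS, ht,
      show pvVseq cs q i + (pvBits cs).getD i 0 + 2 * t
        = (pvVseq cs q i + (pvBits cs).getD i 0) + 2 * t from by ring,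
      Int.add_mul_emod_self_left]
  have hb : (pvBits cs).getD i 0 = (if cs[i] = 'X' then 0 else 1) := by
    have hcs : i < cs.length := h
    simp [pvBits, List.getD, List.getElem?_eq_getElem hcs]
  have hv2 := PySem.Int.mod_two_eq (pvVseq cs q i)
  rw [PySem.Int.mod_eq_emod_of_pos (by norm_num : (0:Int) < 2)] at hv2
  unfold pvOutChar pvEmit
  rw [pvLow_getD T n i h hTlt, pvBinRev_getD, pvRev_getD cs i h, ← hd,
    PySem.Int.mod_eq_emod_of_pos (by norm_num : (0:Int) < 2)]
  by_cases hX : cs[i] = 'X'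
  · rw [hb, if_pos hX] at hbit
    rcases hv2 with hv | hv
    · have hd0 : d = 0 := by omega
      simp [hX, hd0, hv]
    · have hd1 : d = 1 := by omega
      simp [hX, hd1, hv]
  · by_cases hO : cs[i] = 'O'
    · rw [hb, if_neg hX] at hbit
      rcases hv2 with hv | hv
      · have hd1 : d = 1 := by omega
        simp [hX, hO, hd1, hv]
      · have hd0 : d = 0 := by omega
        simp [hX, hO, hd0, hv]
    · simp [hX, hO]

theorem pvB_eq_go (string : String) (q : Int) :
    solve_this_problem_alt string q = String.mk (pvGo string.toList q) := by
  show String.mk ((PySem.List.enumerate string.toList).map (fun ic => pvOutChar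
      (pvZfill string.toList.length (pvFmtB ((PySem.Int.mod
        (q + pvParseBin ('0' :: string.toList.reverse.map (fun c => if c = 'X' then '0' else '1')))
        ((2 : Int) ^ string.toList.length)).toNat)))
      (string.toList.reverse.map (fun c => if c = 'X' then '0' else '1'))
      string.toList.length ic.2 ic.1.toNat))
    = String.mk (pvGo string.toList q)
  congr 1
  apply List.ext_getElem
  · simp [PySem.List.length_enumerate, pvGo_length]
  · intro i hi₁ hi₂
    have hlen : i < string.toList.length := by
      simpa [PySem.List.length_enumerate] using hi₁
    rw [List.getElem_map, PySem.List.getElem_enumerate]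
    have hcast : (((0 : Int) + (i : Int))).toNat = i := by omega
    rw [hcast]
    have := pvElem string.toList q i hlen
    rw [this]
    have hgo : i < (pvGo string.toList q).length := by rw [pvGo_length]; exact hlen
    rw [show (pvGo string.toList q)[i] = (pvGo string.toList q).getD i ' ' from by
      simp [List.getD, List.getElem?_eq_getElem hgo]]
    rw [pvGo_getD string.toList q i hlen]
    rw [List.getD_eq_getElem _ _ hlen]

-- ===== VERDICT (by name: the statement is the Claim_ definition above) =====
theorem solve_this_problem_spec : Claim_equal_solve_this_problem := by
  intro string q _ hpre
  unfold Spec_solve_this_problem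
  rw [pvA_eq_go string q hpre, pvB_eq_go]
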